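-- pv_equiv track=rewrite | github.com/DanPhala/school-report | academicInsights/extraction_agent/utils.py | structure_text
-- ===== SOURCE A (Python) =====
-- from typing import Dict, Any
--
-- def structure_text(text: str) -> Dict[str, Any]:
--     """
--     Structure extracted text into sections
--
--     Args:
--         text: Extracted text
--
--     Returns:
--         Structured dictionary
--     """
--     lines = [line.strip() for line in text.split('\n') if line.strip()]
--
--     structure = {
--         "paragraphs": [],
--         "sections": []
--     }
--
--     current_paragraph = []
--
--     for line in lines:
--         if line.isupper() or line.endswith(':'):
--             if current_paragraph:
--                 structure["paragraphs"].append(" ".join(current_paragraph))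
--                 current_paragraph = []
--             structure["sections"].append(line)
--         else:
--             current_paragraph.append(line)
--
--     if current_paragraph:
--         structure["paragraphs"].append(" ".join(current_paragraph))
--
--     return structure
-- ===== SOURCE B (Python) =====
-- def structure_text(text):
--     lines = [s for s in map(str.strip, text.split('\n')) if s]
--     hdr_pairs = [(i, l) for i, l in enumerate(lines) if l.isupper() or l.endswith(':')]
--     sections = [l for _, l in hdr_pairs]
--     hdr = [i for i, _ in hdr_pairs]
--     starts = [0] + [i + 1 for i in hdr]
--     ends = hdr + [len(lines)]
--     paragraphs = [' '.join(lines[s:e]) for s, e in zip(starts, ends) if s < e]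
--     return {"paragraphs": paragraphs, "sections": sections}
-- ===== Notes on version B (the rewrite author's own statement) =====
-- stated objective: alternative
-- what changed: Replaces A's single pass with a current_paragraph buffer and flush-on-header by a staged index computation: first collect the header positions via enumerate, then derive section list and paragraph segment boundaries (starts/ends) and build each paragraph by slicing lines[s:e] and joining, with no running accumulator.
import Mathlib
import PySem

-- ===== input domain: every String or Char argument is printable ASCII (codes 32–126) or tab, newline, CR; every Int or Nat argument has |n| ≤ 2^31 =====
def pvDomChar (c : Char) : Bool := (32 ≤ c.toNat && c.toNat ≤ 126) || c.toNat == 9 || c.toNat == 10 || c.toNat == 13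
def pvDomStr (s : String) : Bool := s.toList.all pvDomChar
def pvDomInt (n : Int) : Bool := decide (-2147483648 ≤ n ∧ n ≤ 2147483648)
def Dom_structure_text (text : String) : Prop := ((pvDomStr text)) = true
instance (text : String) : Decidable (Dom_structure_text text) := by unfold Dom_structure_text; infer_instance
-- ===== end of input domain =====

-- B replaces A's single pass with a current_paragraph buffer and flush-on-header by a staged
-- computation: collect header indices first, then slice the paragraph segments between them
-- (objective: alternative decomposition, same O(n) cost).

-- hand port of Python str.isupper(), exact on the ASCII domain: some cased character
-- exists and no character is lowercase (on ASCII, cased = letter)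
def pyIsupper (cs : List Char) : Bool :=
  cs.any (fun c => PySem.Chars.isupper c) && cs.all (fun c => !PySem.Chars.islower c)

-- line.isupper() or line.endswith(':')  (written inline in A, the comprehension filter in B)
def pyIsHeader (cs : List Char) : Bool :=
  pyIsupper cs || PySem.Chars.endswith cs [':']

-- [line.strip() for line in text.split('\n') if line.strip()]  (identical first line of A and B)
def linesOf (text : String) : List (List Char) :=
  ((PySem.Chars.splitOn text.toList ['\n']).map PySem.Chars.strip).filter (fun l => l ≠ [])

-- ===== PORT A =====
-- one iteration of A's for-loop over (paragraphs, sections, current_paragraph)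
def stepA (st : List String × List String × List (List Char)) (line : List Char) :
    List String × List String × List (List Char) :=
  if pyIsHeader line then
    if st.2.2 ≠ [] then
      (st.1 ++ [String.ofList (PySem.Chars.join [' '] st.2.2)], st.2.1 ++ [String.ofList line], [])
    else (st.1, st.2.1 ++ [String.ofList line], st.2.2)
  else (st.1, st.2.1, st.2.2 ++ [line])

-- A's trailing 'if current_paragraph:' flush
def flushA (st : List String × List String × List (List Char)) : List String × List String :=
  (if st.2.2 ≠ [] then st.1 ++ [String.ofList (PySem.Chars.join [' '] st.2.2)] else st.1, st.2.1)

def structure_text (text : String) : List (String × List String) :=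
  let out := flushA ((linesOf text).foldl stepA ([], [], []))
  [("paragraphs", out.1), ("sections", out.2)]

-- ===== PORT B =====
-- staged: header index/line pairs via enumerate, then the sections and the paragraph segment
-- bounds (starts/ends), then each paragraph as the slice lines[s:e] joined with ' '
def structure_text_alt (text : String) : List (String × List String) :=
  let lines := linesOf text
  let hdrPairs := (PySem.List.enumerate lines 0).filter (fun p => pyIsHeader p.2)
  let sections := hdrPairs.map (fun p => String.ofList p.2)
  let hdr : List Int := hdrPairs.map (fun p => p.1)
  let starts : List Int := 0 :: hdr.map (· + 1)
  let ends : List Int := hdr ++ [(lines.length : Int)]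
  let paragraphs := ((starts.zip ends).filter (fun p => p.1 < p.2)).map
      (fun p => String.ofList (PySem.Chars.join [' '] (PySem.List.slice lines (some p.1) (some p.2))))
  [("paragraphs", paragraphs), ("sections", sections)]

-- ===== PRECONDITION & SPEC =====
def Spec_structure_text (text : String) (out : List (String × List String)) : Prop := out = structure_text_alt text
instance (text : String) (out : List (String × List String)) : Decidable (Spec_structure_text text out) := by unfold Spec_structure_text; infer_instance

-- ===== CLAIM (what is proved, stated in full; the proofs are below) =====
def Claim_equal_structure_text : Prop := ∀ (text : String), Dom_structure_text text → Spec_structure_text text (structure_text text)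

-- ===== LEMMAS AND PROOFS =====

-- run-at-a-time reference function (proof helper shared by both sides)
def runsB : List (List Char) → List String × List String
  | [] => ([], [])
  | l :: ls =>
    if pyIsHeader l then
      let run := l :: ls.takeWhile pyIsHeader
      let out := runsB (ls.dropWhile pyIsHeader)
      (out.1, run.map String.ofList ++ out.2)
    else
      let run := l :: ls.takeWhile (fun x => !pyIsHeader x)
      let out := runsB (ls.dropWhile (fun x => !pyIsHeader x))
      (String.ofList (PySem.Chars.join [' '] run) :: out.1, out.2)
  termination_by ls => ls.length
  decreasing_by
    · exact Nat.lt_succ_of_le (List.length_dropWhile_le _ _)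
    · exact Nat.lt_succ_of_le (List.length_dropWhile_le _ _)

-- element-at-a-time form of the A-side loop, the pending paragraph generalized
def runsE (cur : List (List Char)) : List (List Char) → List String × List String
  | [] => if cur = [] then ([], []) else ([String.ofList (PySem.Chars.join [' '] cur)], [])
  | l :: ls =>
    if pyIsHeader l then
      ((if cur = [] then [] else [String.ofList (PySem.Chars.join [' '] cur)]) ++ (runsE [] ls).1,
       String.ofList l :: (runsE [] ls).2)
    else runsE (cur ++ [l]) ls

-- element-at-a-time form of B's staged result: a non-header line is merged into the
-- head paragraph when the next line is also a non-header
def stepF : List (List Char) → List String × List String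
  | [] => ([], [])
  | l :: ls =>
    let r := stepF ls
    if pyIsHeader l then (r.1, String.ofList l :: r.2)
    else
      match ls with
      | [] => ([String.ofList l], r.2)
      | h :: _ =>
        if pyIsHeader h then (String.ofList l :: r.1, r.2)
        else
          match r.1 with
          | p :: ps => (String.ofList (l ++ ' ' :: p.toList) :: ps, r.2)
          | [] => ([String.ofList l], r.2)

theorem runsB_absorb (ls : List (List Char)) :
    runsB ls = ((runsB (ls.dropWhile pyIsHeader)).1,
      (ls.takeWhile pyIsHeader).map String.ofList ++ (runsB (ls.dropWhile pyIsHeader)).2) := by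
  cases ls with
  | nil => simp [runsB]
  | cons l ls =>
    by_cases h : pyIsHeader l = true
    · rw [runsB]
      simp [h, List.dropWhile_cons]
    · simp only [List.takeWhile_cons, List.dropWhile_cons, h, if_false, Bool.false_eq_true,
        List.map_nil, List.nil_append]

theorem runsE_eq_runsB (ls : List (List Char)) : ∀ cur : List (List Char),
    runsE cur ls =
      if cur = [] then runsB ls
      else (String.ofList (PySem.Chars.join [' '] (cur ++ ls.takeWhile (fun x => !pyIsHeader x))) ::
              (runsB (ls.dropWhile (fun x => !pyIsHeader x))).1,
            (runsB (ls.dropWhile (fun x => !pyIsHeader x))).2) := by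
  induction ls with
  | nil =>
    intro cur
    by_cases hc : cur = [] <;> simp [runsE, runsB, hc]
  | cons l ls ih =>
    intro cur
    by_cases h : pyIsHeader l = true
    · have habs := runsB_absorb ls
      rw [runsE]
      simp only [h, if_true, ih]
      by_cases hc : cur = []
      · simp only [hc]
        rw [runsB]
        simp [h, habs]
      · simp only [if_neg hc, List.takeWhile_cons, List.dropWhile_cons, h, Bool.not_true,
          Bool.false_eq_true, if_false]
        rw [runsB]
        simp [h, habs]
    · have h' : pyIsHeader l = false := by simpa using h
      rw [runsE]
      simp only [h', Bool.false_eq_true, if_false, ih (cur ++ [l]),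
        List.append_ne_nil_of_right_ne_nil _ (by simp : ([l] : List (List Char)) ≠ [])]
      by_cases hc : cur = []
      · simp only [hc, List.nil_append, List.takeWhile_cons, List.dropWhile_cons,
          h', Bool.not_false, if_true]
        rw [runsB]
        simp [h']
      · simp [hc, List.takeWhile_cons, List.dropWhile_cons, h', List.append_assoc]

theorem foldA_eq_runsE (ls : List (List Char)) : ∀ (paras secs : List String)
    (cur : List (List Char)),
    flushA (ls.foldl stepA (paras, secs, cur)) =
      (paras ++ (runsE cur ls).1, secs ++ (runsE cur ls).2) := by
  induction ls with
  | nil =>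
    intro paras secs cur
    by_cases hc : cur = [] <;> simp [flushA, runsE, hc]
  | cons l ls ih =>
    intro paras secs cur
    rw [List.foldl_cons, runsE]
    by_cases h : pyIsHeader l = true
    · by_cases hc : cur = []
      · rw [show stepA (paras, secs, cur) l = (paras, secs ++ [String.ofList l], cur) by
          simp [stepA, h, hc]]
        simp [ih, runsE_eq_runsB, h, hc]
      · rw [show stepA (paras, secs, cur) l =
          (paras ++ [String.ofList (PySem.Chars.join [' '] cur)], secs ++ [String.ofList l], []) by
          simp [stepA, h, hc]]
        simp [ih, runsE_eq_runsB, h, hc]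
    · rw [show stepA (paras, secs, cur) l = (paras, secs, cur ++ [l]) by simp [stepA, h]]
      simp only [if_neg h]
      exact ih paras secs (cur ++ [l])

-- runsB computes stepF, one line at a time
theorem runsB_eq_stepF (ls : List (List Char)) : runsB ls = stepF ls := by
  induction ls with
  | nil => simp [runsB, stepF]
  | cons l ls ih =>
    by_cases h : pyIsHeader l = true
    · rw [runsB]
      simp only [stepF, h, if_true]
      rw [← ih, runsB_absorb ls]
      simp [h]
    · have h' : pyIsHeader l = false := by simpa using h
      rw [runsB]
      cases ls with
      | nil => simp [h', runsB, stepF, PySem.Chars.join_singleton]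
      | cons b t =>
        by_cases hb : pyIsHeader b = true
        · simp only [h', Bool.false_eq_true, if_false, List.takeWhile_cons,
            List.dropWhile_cons, hb, Bool.not_true, Bool.false_eq_true, if_false]
          rw [ih]
          conv_rhs => rw [stepF.eq_def]
          simp [h', hb, PySem.Chars.join_singleton]
        · have hb' : pyIsHeader b = false := by simpa using hb
          have hform : stepF (b :: t) =
              (String.ofList (PySem.Chars.join [' '] (b :: t.takeWhile (fun x => !pyIsHeader x))) ::
                 (runsB (t.dropWhile (fun x => !pyIsHeader x))).1,
               (runsB (t.dropWhile (fun x => !pyIsHeader x))).2) := by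
            rw [← ih, runsB]
            simp [hb']
          simp only [h', Bool.false_eq_true, if_false, List.takeWhile_cons,
            List.dropWhile_cons, hb', Bool.not_false, if_true]
          rw [stepF.eq_def]
          simp only [h', Bool.false_eq_true, if_false, hb', hform]
          rw [String.toList_ofList]
          simp [PySem.Chars.join_cons_cons]

-- ======= B-side: named pieces of structure_text_alt's pipeline =======
def hdrAt (s : Int) (ls : List (List Char)) : List Int :=
  ((PySem.List.enumerate ls s).filter (fun p => pyIsHeader p.2)).map (fun p => p.1)

def secsOf (ls : List (List Char)) : List String :=
  ((PySem.List.enumerate ls 0).filter (fun p => pyIsHeader p.2)).map (fun p => String.ofList p.2)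

def pairsOf (ls : List (List Char)) : List (Int × Int) :=
  ((0 :: (hdrAt 0 ls).map (· + 1)).zip (hdrAt 0 ls ++ [(ls.length : Int)]))

def parasOf (ls : List (List Char)) : List String :=
  ((pairsOf ls).filter (fun p => p.1 < p.2)).map
    (fun p => String.ofList (PySem.Chars.join [' '] (PySem.List.slice ls (some p.1) (some p.2))))

theorem alt_eq_pieces (text : String) :
    structure_text_alt text =
      [("paragraphs", parasOf (linesOf text)), ("sections", secsOf (linesOf text))] := rfl

theorem enumerate_shift {α : Type} (xs : List α) : ∀ (s : Int),
    PySem.List.enumerate xs s = (PySem.List.enumerate xs 0).map (fun p => (p.1 + s, p.2)) := by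
  induction xs with
  | nil => intro s; simp [PySem.List.enumerate]
  | cons x xs ih =>
    intro s
    rw [PySem.List.enumerate_cons, PySem.List.enumerate_cons, ih (s + 1), ih (0 + 1)]
    simp only [List.map_cons, List.map_map]
    congr 1
    · simp
    · apply List.map_congr_left
      intro p _
      simp [Prod.ext_iff]
      omega

theorem hdrAt_shift (s : Int) (ls : List (List Char)) :
    hdrAt s ls = (hdrAt 0 ls).map (· + s) := by
  unfold hdrAt
  rw [enumerate_shift ls s, List.filter_map, List.map_map, List.map_map]
  rfl

theorem secsOf_shift (s : Int) (ls : List (List Char)) :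
    ((PySem.List.enumerate ls s).filter (fun p => pyIsHeader p.2)).map (fun p => String.ofList p.2)
      = secsOf ls := by
  unfold secsOf
  rw [enumerate_shift ls s, List.filter_map, List.map_map]
  rfl

theorem hdrAt_cons (l : List Char) (ls : List (List Char)) :
    hdrAt 0 (l :: ls) =
      (if pyIsHeader l then [(0 : Int)] else []) ++ (hdrAt 0 ls).map (· + 1) := by
  have h1 : ((PySem.List.enumerate ls 1).filter (fun p => pyIsHeader p.2)).map (fun p => p.1)
      = (hdrAt 0 ls).map (· + 1) := by
    simpa only [hdrAt] using hdrAt_shift 1 ls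
  by_cases h : pyIsHeader l = true <;>
    simp [hdrAt, PySem.List.enumerate_cons, List.filter_cons, h, h1]

theorem secsOf_cons (l : List Char) (ls : List (List Char)) :
    secsOf (l :: ls) = (if pyIsHeader l then [String.ofList l] else []) ++ secsOf ls := by
  have h1 := secsOf_shift 1 ls
  by_cases h : pyIsHeader l = true <;>
    simp [secsOf, PySem.List.enumerate_cons, List.filter_cons, h, h1]

theorem mem_hdrAt_nonneg (ls : List (List Char)) (i : Int) (hi : i ∈ hdrAt 0 ls) : 0 ≤ i := by
  unfold hdrAt at hi
  obtain ⟨p, hp, rfl⟩ := List.mem_map.1 hi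
  obtain ⟨k, hk, rfl⟩ := (PySem.List.mem_enumerate_iff ls 0 p).1 (List.mem_of_mem_filter hp)
  simp

-- slice shift lemmas
theorem slice_cons_succ (l : List Char) (ls : List (List Char)) (a b : Int)
    (ha : 0 ≤ a) (hb : 0 ≤ b) :
    PySem.List.slice (l :: ls) (some (a + 1)) (some (b + 1)) =
      PySem.List.slice ls (some a) (some b) := by
  rw [PySem.List.slice_toNat _ (by omega) (by omega), PySem.List.slice_toNat _ ha hb]
  have h1 : (a + 1).toNat = a.toNat + 1 := by omega
  have h2 : (b + 1).toNat = b.toNat + 1 := by omega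
  simp [h1, h2]

theorem slice_cons_zero (l : List Char) (ls : List (List Char)) (b : Int) (hb : 0 ≤ b) :
    PySem.List.slice (l :: ls) (some 0) (some (b + 1)) =
      l :: PySem.List.slice ls (some 0) (some b) := by
  rw [PySem.List.slice_toNat _ (by omega) (by omega), PySem.List.slice_toNat _ le_rfl hb]
  have h2 : (b + 1).toNat = b.toNat + 1 := by omega
  simp [h2]

theorem mem_pairsOf_nonneg (ls : List (List Char)) (p : Int × Int) (hp : p ∈ pairsOf ls) :
    0 ≤ p.1 ∧ 0 ≤ p.2 := by
  obtain ⟨h1, h2⟩ := List.of_mem_zip hp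
  constructor
  · rcases List.mem_cons.1 h1 with h | h
    · omega
    · obtain ⟨i, hi, hei⟩ := List.mem_map.1 h
      have := mem_hdrAt_nonneg ls i hi
      omega
  · rcases List.mem_append.1 h2 with h | h
    · exact mem_hdrAt_nonneg ls p.2 h
    · simp at h; omega

-- pushing a cons through B's pipeline: shifted pairs slice the tail
theorem parasOf_shifted (l : List Char) (ls : List (List Char)) (pre : List (Int × Int))
    (hpre : ∀ p ∈ pre, p ∈ pairsOf ls) :
    ((pre.map (fun p : Int × Int => (p.1 + 1, p.2 + 1))).filter (fun p => p.1 < p.2)).map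
      (fun p => String.ofList (PySem.Chars.join [' '] (PySem.List.slice (l :: ls) (some p.1) (some p.2)))) =
    ((pre.filter (fun p => p.1 < p.2)).map
      (fun p => String.ofList (PySem.Chars.join [' '] (PySem.List.slice ls (some p.1) (some p.2))))) := by
  rw [List.filter_map, List.map_map]
  have hcond : ((fun p : Int × Int => decide (p.1 < p.2)) ∘ (fun p : Int × Int => (p.1 + 1, p.2 + 1))) =
      fun p : Int × Int => decide (p.1 < p.2) := by
    funext p
    simp only [Function.comp_apply, decide_eq_decide]
    omega
  rw [hcond]
  apply List.map_congr_left
  intro p hp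
  have hmem := hpre p (List.mem_of_mem_filter hp)
  obtain ⟨ha, hb⟩ := mem_pairsOf_nonneg ls p hmem
  simp [Function.comp, slice_cons_succ l ls p.1 p.2 ha hb]

-- the pair list as a function of the header-index list and the length bound
def segPairs (H : List Int) (n : Int) : List (Int × Int) :=
  (0 :: H.map (· + 1)).zip (H ++ [n])

theorem pairsOf_eq_segPairs (ls : List (List Char)) :
    pairsOf ls = segPairs (hdrAt 0 ls) (ls.length : Int) := rfl

theorem zip_shift (xs ys : List Int) :
    (xs.map (· + 1)).zip (ys.map (· + 1)) =
      (xs.zip ys).map (fun p : Int × Int => (p.1 + 1, p.2 + 1)) := by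
  rw [List.zip_map]
  apply List.map_congr_left
  intro p _
  rfl

theorem segPairs_cons_zero (H : List Int) (n : Int) :
    segPairs (0 :: H.map (· + 1)) (n + 1) =
      (0, 0) :: (segPairs H n).map (fun p : Int × Int => (p.1 + 1, p.2 + 1)) := by
  unfold segPairs
  rw [List.map_cons, List.cons_append, List.zip_cons_cons]
  congr 1
  rw [show ((0 : Int) + 1) :: (H.map (· + 1)).map (· + 1) = ((0 :: H.map (· + 1)).map (· + 1)) from by
        simp,
      show (H.map (· + 1) ++ [n + 1]) = ((H ++ [n]).map (· + 1)) from by simp,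
      zip_shift]

theorem segPairs_shift (H : List Int) (n : Int) :
    ∃ (e : Int) (tl : List (Int × Int)),
      segPairs H n = (0, e) :: tl ∧
      segPairs (H.map (· + 1)) (n + 1) =
        (0, e + 1) :: tl.map (fun p : Int × Int => (p.1 + 1, p.2 + 1)) ∧
      (H = [] → e = n) ∧ (∀ a r, H = a :: r → e = a) := by
  cases H with
  | nil =>
    refine ⟨n, [], rfl, rfl, fun _ => rfl, fun a r h => by simp at h⟩
  | cons a r =>
    refine ⟨a, ((a + 1) :: r.map (· + 1)).zip (r ++ [n]), ?_, ?_, by simp, by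
      intro a' r' hh
      cases hh
      rfl⟩
    · unfold segPairs
      rw [List.map_cons, List.cons_append, List.zip_cons_cons]
    · unfold segPairs
      rw [List.map_cons, List.map_cons, List.cons_append, List.zip_cons_cons]
      congr 1
      rw [show ((a + 1 + 1) :: (r.map (· + 1)).map (· + 1)) = (((a + 1) :: r.map (· + 1)).map (· + 1)) from by
            simp,
          show (r.map (· + 1) ++ [n + 1]) = ((r ++ [n]).map (· + 1)) from by simp,
          zip_shift]

theorem pairsOf_cons_header (l : List Char) (ls : List (List Char)) (h : pyIsHeader l = true) :
    pairsOf (l :: ls) = (0, 0) :: (pairsOf ls).map (fun p => (p.1 + 1, p.2 + 1)) := by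
  rw [pairsOf_eq_segPairs, pairsOf_eq_segPairs, hdrAt_cons, if_pos h, List.singleton_append,
    List.length_cons, Nat.cast_succ]
  exact segPairs_cons_zero (hdrAt 0 ls) (ls.length : Int)

theorem parasOf_cons_header (l : List Char) (ls : List (List Char)) (h : pyIsHeader l = true) :
    parasOf (l :: ls) = parasOf ls := by
  unfold parasOf
  rw [pairsOf_cons_header l ls h, List.filter_cons_of_neg (by simp)]
  exact parasOf_shifted l ls (pairsOf ls) (fun p hp => hp)

-- in the non-header case the pair list decomposes into a head segment and a shifted tail
theorem pairsOf_cons_nonheader (l : List Char) (ls : List (List Char))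
    (h : pyIsHeader l = false) :
    ∃ (e : Int) (tl : List (Int × Int)), 0 ≤ e ∧
      pairsOf ls = (0, e) :: tl ∧
      pairsOf (l :: ls) = (0, e + 1) :: tl.map (fun p => (p.1 + 1, p.2 + 1)) ∧
      (∀ p ∈ tl, p ∈ pairsOf ls) ∧
      (ls = [] → e = 0) ∧
      (∀ h' t', ls = h' :: t' → (pyIsHeader h' = true → e = 0) ∧ (pyIsHeader h' = false → 1 ≤ e)) := by
  obtain ⟨e, tl, h1, h2, hnilc, hconsc⟩ := segPairs_shift (hdrAt 0 ls) (ls.length : Int)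
  have hpls : pairsOf ls = (0, e) :: tl := by rw [pairsOf_eq_segPairs]; exact h1
  refine ⟨e, tl, ?_, hpls, ?_, ?_, ?_, ?_⟩
  · -- 0 ≤ e: e is either a header index or the length
    rcases hcase : hdrAt 0 ls with _ | ⟨a, r⟩
    · rw [hnilc hcase]; positivity
    · rw [hconsc a r hcase]
      exact mem_hdrAt_nonneg ls a (by rw [hcase]; simp)
  · rw [pairsOf_eq_segPairs, hdrAt_cons, if_neg (by simp [h]), List.nil_append,
      List.length_cons, Nat.cast_succ]
    exact h2
  · intro p hp
    rw [hpls]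
    exact List.mem_cons_of_mem _ hp
  · intro hnil
    subst hnil
    have : hdrAt 0 ([] : List (List Char)) = [] := rfl
    rw [hnilc this]
    rfl
  · intro h' t' hls
    constructor
    · intro hh
      have : hdrAt 0 ls = 0 :: (hdrAt 0 t').map (· + 1) := by
        rw [hls, hdrAt_cons, hh]; simp
      exact hconsc _ _ this
    · intro hh
      have hcase : hdrAt 0 ls = (hdrAt 0 t').map (· + 1) := by
        rw [hls, hdrAt_cons, hh]; simp
      rcases hr : hdrAt 0 t' with _ | ⟨a, r⟩
      · rw [hr] at hcase
        simp at hcase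
        rw [hnilc hcase, hls]
        simp only [List.length_cons, Nat.cast_succ]
        have : (0 : Int) ≤ (t'.length : Int) := by positivity
        omega
      · rw [hr, List.map_cons] at hcase
        have := hconsc _ _ hcase
        have ha : 0 ≤ a := mem_hdrAt_nonneg t' a (by rw [hr]; simp)
        omega

-- one-step unfoldings of stepF
theorem stepF_cons_header (l : List Char) (ls : List (List Char)) (h : pyIsHeader l = true) :
    stepF (l :: ls) = ((stepF ls).1, String.ofList l :: (stepF ls).2) := by
  rw [stepF.eq_def]
  simp [h]

theorem stepF_singleton (l : List Char) (h : pyIsHeader l = false) :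
    stepF [l] = ([String.ofList l], [String.ofList l].tail) := by
  rw [stepF.eq_def]
  simp [h, stepF]

theorem stepF_cons_cons_header (l b : List Char) (t : List (List Char))
    (h : pyIsHeader l = false) (hb : pyIsHeader b = true) :
    stepF (l :: b :: t) = (String.ofList l :: (stepF (b :: t)).1, (stepF (b :: t)).2) := by
  rw [stepF.eq_def]
  simp only [h, Bool.false_eq_true, if_false, hb, if_true]

theorem stepF_cons_cons_nonheader (l b : List Char) (t : List (List Char))
    (h : pyIsHeader l = false) (hb : pyIsHeader b = false) :
    stepF (l :: b :: t) =
      (match (stepF (b :: t)).1 with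
       | p :: ps => (String.ofList (l ++ ' ' :: p.toList) :: ps, (stepF (b :: t)).2)
       | [] => ([String.ofList l], (stepF (b :: t)).2)) := by
  rw [stepF.eq_def]
  simp only [h, Bool.false_eq_true, if_false, hb]

theorem slice_zero_zero (ls : List (List Char)) :
    PySem.List.slice ls (some 0) (some 0) = [] := by
  rw [PySem.List.slice_toNat _ le_rfl le_rfl]
  simp

theorem slice_head (b : List Char) (ts : List (List Char)) (e : Int) (he : 1 ≤ e) :
    PySem.List.slice (b :: ts) (some 0) (some e) = b :: List.take (e.toNat - 1) ts := by
  rw [PySem.List.slice_toNat _ le_rfl (by omega)]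
  have : e.toNat = (e.toNat - 1) + 1 := by omega
  rw [this]
  simp

theorem stepF_eq_pieces (ls : List (List Char)) :
    parasOf ls = (stepF ls).1 ∧ secsOf ls = (stepF ls).2 := by
  induction ls with
  | nil =>
    constructor
    · simp [parasOf, pairsOf, hdrAt, PySem.List.enumerate, stepF]
    · simp [secsOf, PySem.List.enumerate, stepF]
  | cons l ls ih =>
    by_cases h : pyIsHeader l = true
    · rw [stepF_cons_header l ls h]
      refine ⟨?_, ?_⟩
      · rw [parasOf_cons_header l ls h, ih.1]
      · rw [secsOf_cons, ih.2]
        simp [h]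
    · have h' : pyIsHeader l = false := by simpa using h
      obtain ⟨e, tl, he0, hls, hcons, htl, hnil, hhead⟩ := pairsOf_cons_nonheader l ls h'
      have hsecs : secsOf (l :: ls) = secsOf ls := by rw [secsOf_cons]; simp [h']
      have hparas : parasOf (l :: ls) =
          String.ofList (PySem.Chars.join [' ']
            (l :: PySem.List.slice ls (some 0) (some e))) ::
          ((tl.filter (fun p => p.1 < p.2)).map
            (fun p => String.ofList (PySem.Chars.join [' '] (PySem.List.slice ls (some p.1) (some p.2))))) := by
        unfold parasOf
        rw [hcons, List.filter_cons_of_pos (by simp; omega), List.map_cons,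
          slice_cons_zero l ls e he0, parasOf_shifted l ls tl htl]
      have hparasls : parasOf ls =
          (if 0 < e then
            [String.ofList (PySem.Chars.join [' '] (PySem.List.slice ls (some 0) (some e)))] else []) ++
          ((tl.filter (fun p => p.1 < p.2)).map
            (fun p => String.ofList (PySem.Chars.join [' '] (PySem.List.slice ls (some p.1) (some p.2))))) := by
        unfold parasOf
        rw [hls]
        by_cases hpos : 0 < e
        · rw [List.filter_cons_of_pos (by simp; omega), List.map_cons]
          simp [hpos]
        · rw [List.filter_cons_of_neg (by simp; omega)]
          simp [hpos]
      cases ls with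
      | nil =>
        have he : e = 0 := hnil rfl
        have htl0 : tl = [] := by
          have h0 := hls
          simp [pairsOf, hdrAt, PySem.List.enumerate, segPairs] at h0
          exact h0.2
        rw [stepF_singleton l h']
        refine ⟨?_, ?_⟩
        · rw [hparas, he, slice_zero_zero, htl0]
          simp [PySem.Chars.join_singleton]
        · rw [hsecs]
          simp [secsOf, PySem.List.enumerate]
      | cons b t =>
        by_cases hb : pyIsHeader b = true
        · have he : e = 0 := (hhead b t rfl).1 hb
          rw [stepF_cons_cons_header l b t h' hb]
          refine ⟨?_, ?_⟩
          · rw [hparas, he, slice_zero_zero]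
            rw [← ih.1, hparasls, he]
            simp [PySem.Chars.join_singleton]
          · rw [hsecs, ih.2]
        · have hb' : pyIsHeader b = false := by simpa using hb
          have he : 1 ≤ e := (hhead b t rfl).2 hb'
          have hsl : PySem.List.slice (b :: t) (some 0) (some e) = b :: List.take (e.toNat - 1) t :=
            slice_head b t e he
          have hfp : (stepF (b :: t)).1 =
              String.ofList (PySem.Chars.join [' '] (b :: List.take (e.toNat - 1) t)) ::
              ((tl.filter (fun p => p.1 < p.2)).map
                (fun p => String.ofList (PySem.Chars.join [' '] (PySem.List.slice (b :: t) (some p.1) (some p.2))))) := by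
            rw [← ih.1, hparasls, hsl]
            simp [show (0:Int) < e by omega]
          rw [stepF_cons_cons_nonheader l b t h' hb']
          refine ⟨?_, ?_⟩
          · rw [hparas, hsl, hfp]
            simp only [String.toList_ofList]
            rw [PySem.Chars.join_cons_cons]
            simp
          · rw [hsecs, ih.2, hfp]

-- ===== VERDICT (by name: the statement is the Claim_ definition above) =====
theorem structure_text_spec : Claim_equal_structure_text := by
  intro text _
  unfold Spec_structure_text
  rw [alt_eq_pieces]
  obtain ⟨hp, hs⟩ := stepF_eq_pieces (linesOf text)
  unfold structure_text
  have h1 := foldA_eq_runsE (linesOf text) [] [] []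
  have h2 := runsE_eq_runsB (linesOf text) []
  rw [if_pos rfl] at h2
  simp only [h1, h2, List.nil_append, runsB_eq_stepF, hp, hs]
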